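-- pv_equiv track=rewrite | github.com/yb235/ASCII2 | visual_analysis_agent.py | _analyze_color_temperature
-- ===== SOURCE A (Python) =====
-- from typing import List, Tuple, Optional, Dict, Any
--
-- def _analyze_color_temperature(dominant_colors: List[Tuple[str, str]]) -> str:
--     """Analyze overall color temperature"""
--     warm_colors = ['red', 'orange', 'yellow', 'pink', 'brown']
--     cool_colors = ['blue', 'green', 'cyan', 'purple', 'lightblue']
--     neutral_colors = ['gray', 'white', 'black']
--
--     warm_count = sum(1 for color_name, _ in dominant_colors if color_name in warm_colors)
--     cool_count = sum(1 for color_name, _ in dominant_colors if color_name in cool_colors)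
--     neutral_count = sum(1 for color_name, _ in dominant_colors if color_name in neutral_colors)
--
--     if warm_count > cool_count and warm_count > neutral_count:
--         return "warm"
--     elif cool_count > warm_count and cool_count > neutral_count:
--         return "cool"
--     else:
--         return "neutral"
-- ===== SOURCE B (Python) =====
-- def _analyze_color_temperature(dominant_colors):
--     """Analyze overall color temperature (single-pass tally over a category table)"""
--     category_of = {
--         'red': 'warm', 'orange': 'warm', 'yellow': 'warm', 'pink': 'warm', 'brown': 'warm',
--         'blue': 'cool', 'green': 'cool', 'cyan': 'cool', 'purple': 'cool', 'lightblue': 'cool',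
--         'gray': 'neutral', 'white': 'neutral', 'black': 'neutral',
--     }
--     counts = {'warm': 0, 'cool': 0, 'neutral': 0}
--     for color_name, _ in dominant_colors:
--         cat = category_of.get(color_name)
--         if cat is not None:
--             counts[cat] += 1
--     if counts['warm'] > counts['cool'] and counts['warm'] > counts['neutral']:
--         return "warm"
--     if counts['cool'] > counts['warm'] and counts['cool'] > counts['neutral']:
--         return "cool"
--     return "neutral"
-- ===== Notes on version B (the rewrite author's own statement) =====
-- stated objective: simpler
-- what changed: Replaces A's three separate membership-scan passes over the input (one per category) with a single pass that tallies all three counts at once via a color-to-category lookup table; the final strict-greater comparison is unchanged.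
import Mathlib
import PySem

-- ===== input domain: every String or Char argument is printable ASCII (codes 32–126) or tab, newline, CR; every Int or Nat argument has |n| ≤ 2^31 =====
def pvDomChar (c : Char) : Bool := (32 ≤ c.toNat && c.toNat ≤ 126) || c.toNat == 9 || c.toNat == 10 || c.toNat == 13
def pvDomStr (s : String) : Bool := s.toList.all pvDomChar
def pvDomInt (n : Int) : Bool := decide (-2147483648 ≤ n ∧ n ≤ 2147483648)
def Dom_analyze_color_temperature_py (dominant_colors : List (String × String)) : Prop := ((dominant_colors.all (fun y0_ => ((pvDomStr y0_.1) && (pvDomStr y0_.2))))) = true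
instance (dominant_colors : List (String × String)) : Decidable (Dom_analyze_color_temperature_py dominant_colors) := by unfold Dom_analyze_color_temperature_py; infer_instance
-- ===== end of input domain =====

-- B changes A's three membership-scan passes into one tallying pass over a color→category table; objective: simpler.

-- ===== PORT A =====
def pvWarmColors : List String := ["red", "orange", "yellow", "pink", "brown"]
def pvCoolColors : List String := ["blue", "green", "cyan", "purple", "lightblue"]
def pvNeutralColors : List String := ["gray", "white", "black"]

def analyze_color_temperature_py (dominant_colors : List (String × String)) : String :=
  let warm_count : Int :=
    (dominant_colors.map (fun p => if pvWarmColors.contains p.1 then (1 : Int) else 0)).sum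
  let cool_count : Int :=
    (dominant_colors.map (fun p => if pvCoolColors.contains p.1 then (1 : Int) else 0)).sum
  let neutral_count : Int :=
    (dominant_colors.map (fun p => if pvNeutralColors.contains p.1 then (1 : Int) else 0)).sum
  if warm_count > cool_count ∧ warm_count > neutral_count then "warm"
  else if cool_count > warm_count ∧ cool_count > neutral_count then "cool"
  else "neutral"

-- ===== PORT B =====
def pvCategoryOf : PySem.Dict String String := PySem.Dict.mk  -- dict literal with all-distinct keys: the assoc list as written
  [("red", "warm"), ("orange", "warm"), ("yellow", "warm"), ("pink", "warm"), ("brown", "warm"),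
   ("blue", "cool"), ("green", "cool"), ("cyan", "cool"), ("purple", "cool"), ("lightblue", "cool"),
   ("gray", "neutral"), ("white", "neutral"), ("black", "neutral")]

-- one tallying step of B's loop: counts is the ('warm', 'cool', 'neutral') count triple
def pvTallyStep (counts : Int × Int × Int) (p : String × String) : Int × Int × Int :=
  match pvCategoryOf.get? p.1 with
  | some cat =>
      if cat == "warm" then (counts.1 + 1, counts.2.1, counts.2.2)
      else if cat == "cool" then (counts.1, counts.2.1 + 1, counts.2.2)
      else (counts.1, counts.2.1, counts.2.2 + 1)
  | none => counts

def analyze_color_temperature_py_alt (dominant_colors : List (String × String)) : String :=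
  let counts := dominant_colors.foldl pvTallyStep (0, 0, 0)
  if counts.1 > counts.2.1 ∧ counts.1 > counts.2.2 then "warm"
  else if counts.2.1 > counts.1 ∧ counts.2.1 > counts.2.2 then "cool"
  else "neutral"

-- ===== PRECONDITION & SPEC =====
def Spec_analyze_color_temperature_py (dominant_colors : List (String × String)) (out : String) : Prop := out = analyze_color_temperature_py_alt dominant_colors
instance (dominant_colors : List (String × String)) (out : String) : Decidable (Spec_analyze_color_temperature_py dominant_colors out) := by unfold Spec_analyze_color_temperature_py; infer_instance

-- ===== CLAIM (what is proved, stated in full; the proofs are below) =====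
def Claim_equal_analyze_color_temperature_py : Prop := ∀ (dominant_colors : List (String × String)), Dom_analyze_color_temperature_py dominant_colors → Spec_analyze_color_temperature_py dominant_colors (analyze_color_temperature_py dominant_colors)

-- ===== LEMMAS AND PROOFS =====

-- the table lookup agrees with A's three membership tests (the lists are pairwise disjoint)
lemma pvCategoryOf_eq (x : String) :
    pvCategoryOf.get? x =
      if pvWarmColors.contains x then some "warm"
      else if pvCoolColors.contains x then some "cool"
      else if pvNeutralColors.contains x then some "neutral"
      else none := by
  simp only [pvCategoryOf, pvWarmColors, pvCoolColors, pvNeutralColors,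
    PySem.Dict.get?_mk_cons, List.contains_cons, List.contains_nil]
  by_cases h1 : x = "red"; · subst h1; rfl
  by_cases h2 : x = "orange"; · subst h2; rfl
  by_cases h3 : x = "yellow"; · subst h3; rfl
  by_cases h4 : x = "pink"; · subst h4; rfl
  by_cases h5 : x = "brown"; · subst h5; rfl
  by_cases h6 : x = "blue"; · subst h6; rfl
  by_cases h7 : x = "green"; · subst h7; rfl
  by_cases h8 : x = "cyan"; · subst h8; rfl
  by_cases h9 : x = "purple"; · subst h9; rfl
  by_cases h10 : x = "lightblue"; · subst h10; rfl
  by_cases h11 : x = "gray"; · subst h11; rfl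
  by_cases h12 : x = "white"; · subst h12; rfl
  by_cases h13 : x = "black"; · subst h13; rfl
  simp [h1, h2, h3, h4, h5, h6, h7, h8, h9, h10, h11, h12, h13, Ne.symm, PySem.Dict.get?]

-- the three color lists are pairwise disjoint
lemma pvWarm_not_cool (x : String) (h : x ∈ pvWarmColors) : x ∉ pvCoolColors := by
  simp [pvWarmColors] at h; rcases h with rfl | rfl | rfl | rfl | rfl <;> decide

lemma pvWarm_not_neutral (x : String) (h : x ∈ pvWarmColors) : x ∉ pvNeutralColors := by
  simp [pvWarmColors] at h; rcases h with rfl | rfl | rfl | rfl | rfl <;> decide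

lemma pvCool_not_neutral (x : String) (h : x ∈ pvCoolColors) : x ∉ pvNeutralColors := by
  simp [pvCoolColors] at h; rcases h with rfl | rfl | rfl | rfl | rfl <;> decide

-- B's fold computes the three counts, shifted by the accumulator
lemma pvTally_eq (xs : List (String × String)) (w c n : Int) :
    xs.foldl pvTallyStep (w, c, n) =
      (w + (xs.map (fun p => if pvWarmColors.contains p.1 then (1 : Int) else 0)).sum,
       c + (xs.map (fun p => if pvCoolColors.contains p.1 then (1 : Int) else 0)).sum,
       n + (xs.map (fun p => if pvNeutralColors.contains p.1 then (1 : Int) else 0)).sum) := by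
  induction xs generalizing w c n with
  | nil => simp
  | cons p xs ih =>
    simp only [List.foldl_cons, List.map_cons, List.sum_cons, pvTallyStep, pvCategoryOf_eq p.1]
    by_cases h1 : p.1 ∈ pvWarmColors
    · simp [h1, pvWarm_not_cool p.1 h1, pvWarm_not_neutral p.1 h1, ih, Prod.ext_iff]; omega
    by_cases h2 : p.1 ∈ pvCoolColors
    · simp [h1, h2, pvCool_not_neutral p.1 h2, ih, Prod.ext_iff]; omega
    by_cases h3 : p.1 ∈ pvNeutralColors
    · simp [h1, h2, h3, ih, Prod.ext_iff]; omega
    · simp [h1, h2, h3, ih]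

-- ===== VERDICT (by name: the statement is the Claim_ definition above) =====
theorem analyze_color_temperature_py_spec : Claim_equal_analyze_color_temperature_py := by
  intro xs _
  unfold Spec_analyze_color_temperature_py analyze_color_temperature_py analyze_color_temperature_py_alt
  simp only [pvTally_eq xs 0 0 0, zero_add]
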